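-- pv_equiv track=rewrite | github.com/zjma/codegames | cf1380/C.PY | solve
-- ===== SOURCE A (Python) =====
-- import math
--
-- def solve(arr, x):
--     arr.sort(reverse=True)
--     n=len(arr)
--     cost=[math.ceil(x/v) for v in arr]
--     dp=[0]*(n+1)
--     for i in range(1,n+1):
--         dp[i]=max(dp[i],dp[i-1])
--         if i-cost[i-1]>=0:
--             dp[i]=max(dp[i],dp[i-cost[i-1]]+1)
--     return dp[n]
-- ===== SOURCE B (Python) =====
-- import math
--
-- def solve(arr, x):
--     # Greedy: strongest first; each power v needs a group of at least ceil(x/v)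
--     # members, so close a team as soon as the current group is big enough for
--     # its weakest (= current) member.
--     arr.sort(reverse=True)
--     ans = 0
--     cnt = 0
--     for v in arr:
--         cnt += 1
--         if math.ceil(x / v) <= cnt:
--             ans += 1
--             cnt = 0
--     return ans
-- ===== Notes on version B (the rewrite author's own statement) =====
-- stated objective: simpler
-- what changed: Replaces A's materialised ceil-cost array plus (n+1)-cell dp table with the standard one-pass greedy sweep keeping only a running group size and the answer; Pre_ restricts to the task's natural domain where every required group size ceil(x/v) is defined and nonnegative (v != 0, and -v < x for v > 0, x < -v for v < 0), since outside it A raises ZeroDivisionError/IndexError or returns counts read off unwritten dp cells.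
-- outside the precondition, e.g. on solve([2, -1, -9], 1): A returns 2, B returns 3
import Mathlib
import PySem

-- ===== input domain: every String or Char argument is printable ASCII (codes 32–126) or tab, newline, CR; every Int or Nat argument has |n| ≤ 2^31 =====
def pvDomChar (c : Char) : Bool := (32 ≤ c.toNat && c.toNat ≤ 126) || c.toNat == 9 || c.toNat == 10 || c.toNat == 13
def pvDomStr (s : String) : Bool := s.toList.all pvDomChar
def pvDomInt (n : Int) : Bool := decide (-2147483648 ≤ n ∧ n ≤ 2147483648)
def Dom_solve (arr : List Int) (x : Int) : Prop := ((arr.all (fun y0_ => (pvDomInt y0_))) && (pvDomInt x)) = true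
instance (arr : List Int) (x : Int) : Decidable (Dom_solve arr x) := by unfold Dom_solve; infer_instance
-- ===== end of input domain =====

-- B replaces A's ceil-cost array + dp table with the standard one-pass greedy sweep after
-- the same in-place descending sort (the claim is about the return value; both mutate arr
-- identically by sorting it). Objective: simpler.


-- ===== PORT A =====
-- math.ceil(x/v) as exact integer ceiling -((-x)//v): exact on Dom (|x|,|v| ≤ 2^31),
-- since there a float quotient can never sit on the wrong side of an integer.
def pyCeilDiv (x v : Int) : Int := -(PySem.Int.floordiv (-x) v)

-- the body of A's for-loop, verbatim (dp[i]=max(dp[i],dp[i-1]);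
-- if i-cost[i-1]>=0: dp[i]=max(dp[i],dp[i-cost[i-1]]+1)); pyGetD/pySetD are the
-- totalised list accesses, in range under Pre_solve
def solveStep (cost : List Int) (dp : List Int) (i : Int) : List Int :=
  let dp := PySem.List.pySetD dp i (max (PySem.List.pyGetD dp i 0) (PySem.List.pyGetD dp (i - 1) 0))
  if 0 ≤ i - PySem.List.pyGetD cost (i - 1) 0 then
    PySem.List.pySetD dp i (max (PySem.List.pyGetD dp i 0)
      (PySem.List.pyGetD dp (i - PySem.List.pyGetD cost (i - 1) 0) 0 + 1))
  else dp

def solve (arr : List Int) (x : Int) : Int :=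
  let b := PySem.List.sorted arr id true
  let n : Int := (b.length : Int)
  let cost := b.map (fun v => pyCeilDiv x v)
  let dp0 : List Int := List.replicate (b.length + 1) 0
  let dp := (PySem.List.pyRange 1 (n + 1) 1).foldl (solveStep cost) dp0
  PySem.List.pyGetD dp n 0

-- ===== PORT B =====
def solve_alt (arr : List Int) (x : Int) : Int :=
  let b := PySem.List.sorted arr id true
  (b.foldl (fun (s : Int × Int) v =>
      let cnt := s.1 + 1
      if pyCeilDiv x v ≤ cnt then (0, s.2 + 1) else (cnt, s.2)) ((0 : Int), (0 : Int))).2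

-- ===== PRECONDITION & SPEC =====
-- Pre_ restricts to the task's natural domain: every required group size ceil(x/v) is
-- defined and nonnegative (v ≠ 0, and -v < x when v > 0, x < -v when v < 0). Outside it A
-- either raises (v = 0 gives ZeroDivisionError; a negative ceil cost at the last sorted
-- position makes dp[i-cost] an IndexError) or, when a negative cost lands earlier, returns
-- counts read off unwritten dp cells beyond the filled prefix (e.g. arr=[2,-1,-9], x=1:
-- A returns 2, B returns 3) — a negative required size is outside the task's meaning.
def Pre_solve (arr : List Int) (x : Int) : Prop :=
  ∀ v ∈ arr, v ≠ 0 ∧ (0 < v → -v < x) ∧ (v < 0 → x < -v)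
instance (arr : List Int) (x : Int) : Decidable (Pre_solve arr x) := by unfold Pre_solve; infer_instance

def pvWitness_solve : List Int × Int := ([3, 1, 2], 4)

def Spec_solve (arr : List Int) (x : Int) (out : Int) : Prop := out = solve_alt arr x
instance (arr : List Int) (x : Int) (out : Int) : Decidable (Spec_solve arr x out) := by unfold Spec_solve; infer_instance

-- ===== CLAIM (what is proved, stated in full; the proofs are below) =====
def Claim_equal_solve : Prop := ∀ (arr : List Int) (x : Int), Dom_solve arr x → Pre_solve arr x → Spec_solve arr x (solve arr x)

-- ===== LEMMAS AND PROOFS =====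

-- pure index recursion equal to A's dp loop (cells beyond the written prefix read as 0,
-- exactly like the totalised port)
def dpRec (cs : List Int) : Nat → Int
  | 0 => 0
  | k + 1 =>
    let c := cs.getD k 0
    if c < 0 then max (dpRec cs k) 1
    else if c = 0 then dpRec cs k + 1
    else if c ≤ (k + 1 : Int) then
      max (dpRec cs k) (dpRec cs (k + 1 - c.toNat) + 1)
    else dpRec cs k
  termination_by k => k
  decreasing_by all_goals omega

-- pure index recursion equal to B's greedy sweep, read through the cost list
def gRec (cs : List Int) : Nat → Int × Int
  | 0 => (0, 0)
  | k + 1 =>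
    let p := gRec cs k
    if cs.getD k 0 ≤ p.1 + 1 then (0, p.2 + 1) else (p.1 + 1, p.2)

theorem dpRec_le_succ (cs : List Int) (k : Nat) : dpRec cs k ≤ dpRec cs (k + 1) := by
  rw [dpRec]
  split
  · exact le_max_left _ _
  · split
    · omega
    · split
      · exact le_max_left _ _
      · exact le_refl _

theorem dpRec_mono (cs : List Int) {j k : Nat} (h : j ≤ k) : dpRec cs j ≤ dpRec cs k := by
  induction k with
  | zero =>
    have hj : j = 0 := by omega
    simp [hj]
  | succ k ih =>
    rcases Nat.lt_or_ge j (k + 1) with h' | h'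
    · exact le_trans (ih (by omega)) (dpRec_le_succ cs k)
    · have : j = k + 1 := by omega
      simp [this]

theorem dpRec_nonneg (cs : List Int) (k : Nat) : 0 ≤ dpRec cs k := by
  have h := dpRec_mono cs (Nat.zero_le k)
  rw [dpRec] at h
  exact h

-- the greedy invariant
def GInv (cs : List Int) (k : Nat) : Prop :=
  0 ≤ (gRec cs k).1 ∧ (gRec cs k).1 ≤ (k : Int) ∧
  (∀ j : Nat, k - (gRec cs k).1.toNat ≤ j → j ≤ k → dpRec cs j = (gRec cs k).2) ∧
  ((gRec cs k).1 = (k : Int) ∨ dpRec cs (k - (gRec cs k).1.toNat - 1) = (gRec cs k).2 - 1)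

theorem inv_holds (cs : List Int) (hnn : ∀ j : Nat, 0 ≤ cs.getD j 0) : ∀ k, GInv cs k := by
  intro k
  induction k with
  | zero =>
    unfold GInv
    refine ⟨by simp [gRec], by simp [gRec], ?_, Or.inl (by simp [gRec])⟩
    intro j h1 h2
    interval_cases j
    simp [gRec, dpRec]
  | succ k ih =>
    have H := ih
    unfold GInv at H ⊢
    obtain ⟨h0, h1, h2, h3⟩ := H
    set c := cs.getD k 0 with hcdef
    set cnt := (gRec cs k).1 with hcnt
    set ans := (gRec cs k).2 with hans
    have hdk : dpRec cs k = ans := h2 k (by omega) (le_refl k)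
    have hansnn : 0 ≤ ans := hdk ▸ dpRec_nonneg cs k
    have hc0 : 0 ≤ c := hnn k
    by_cases hzero : c = 0
    · -- zero required size: immediate extra team on both sides
      have hd : dpRec cs (k + 1) = ans + 1 := by
        rw [dpRec]
        simp only [← hcdef]
        rw [if_neg (by omega), if_pos hzero, hdk]
      have hg : gRec cs (k + 1) = (0, ans + 1) := by
        rw [gRec]; simp only [← hcdef, ← hcnt, ← hans]
        rw [if_pos (by omega)]
      refine ⟨by rw [hg], by rw [hg]; push_cast; omega, ?_, ?_⟩
      · intro j hj1 hj2
        rw [hg]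
        have : j = k + 1 := by simp [hg] at hj1; omega
        rw [this, hd]
      · right
        rw [hg]
        simpa using hdk
    · have hc1 : 1 ≤ c := by omega
      by_cases hteam : c ≤ cnt + 1
      · -- a team closes at element k+1
        have hg : gRec cs (k + 1) = (0, ans + 1) := by
          rw [gRec]; simp only [← hcdef, ← hcnt, ← hans]
          rw [if_pos hteam]
        have hidx1 : k + 1 - c.toNat ≤ k := by omega
        have hidx2 : k - cnt.toNat ≤ k + 1 - c.toNat := by omega
        have hdmid : dpRec cs (k + 1 - c.toNat) = ans := h2 _ hidx2 hidx1
        have hd : dpRec cs (k + 1) = ans + 1 := by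
          rw [dpRec]
          simp only [← hcdef]
          rw [if_neg (by omega), if_neg hzero, if_pos (by omega : c ≤ ((k : Int) + 1))]
          rw [hdmid, hdk]
          omega
        refine ⟨by rw [hg], by rw [hg]; push_cast; omega, ?_, ?_⟩
        · intro j hj1 hj2
          rw [hg]
          have : j = k + 1 := by simp [hg] at hj1; omega
          rw [this, hd]
        · right
          rw [hg]
          simpa using hdk
      · -- no team: the group grows
        have hg : gRec cs (k + 1) = (cnt + 1, ans) := by
          rw [gRec]; simp only [← hcdef, ← hcnt, ← hans]
          rw [if_neg hteam]
        have hd : dpRec cs (k + 1) = ans := by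
          rw [dpRec]
          simp only [← hcdef]
          rw [if_neg (by omega), if_neg hzero]
          split
          · rcases h3 with hcase | hcase
            · exfalso; omega
            · have hle : k + 1 - c.toNat ≤ k - cnt.toNat - 1 := by omega
              have := dpRec_mono cs hle
              rw [hcase] at this
              rw [hdk]
              omega
          · exact hdk
        refine ⟨by rw [hg]; omega, by rw [hg]; push_cast; omega, ?_, ?_⟩
        · intro j hj1 hj2
          rw [hg]
          rcases Nat.lt_or_ge j (k + 1) with h' | h'
          · refine h2 j ?_ (by omega)
            have : (cnt + 1).toNat = cnt.toNat + 1 := by omega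
            rw [hg] at hj1
            simp only [this] at hj1
            omega
          · have : j = k + 1 := by omega
            rw [this, hd]
        · rw [hg]
          rcases h3 with hcase | hcase
          · left; push_cast; omega
          · right
            have : (cnt + 1).toNat = cnt.toNat + 1 := by omega
            rw [this]
            have he : k + 1 - (cnt.toNat + 1) - 1 = k - cnt.toNat - 1 := by omega
            rw [he, hcase, hans]

theorem dpRec_eq_gRec (cs : List Int) (hnn : ∀ j : Nat, 0 ≤ cs.getD j 0) :
    dpRec cs cs.length = (gRec cs cs.length).2 := by
  have H := inv_holds cs hnn cs.length
  unfold GInv at H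
  obtain ⟨_, _, h2, _⟩ := H
  exact h2 cs.length (by omega) (le_refl _)

-- gRec ignores costs beyond the prefix it reads
theorem gRec_append (cs ds : List Int) : ∀ k, k ≤ cs.length → gRec (cs ++ ds) k = gRec cs k := by
  intro k
  induction k with
  | zero => intro _; simp [gRec]
  | succ k ih =>
    intro hk
    rw [gRec, gRec, ih (by omega), List.getD_append cs ds 0 k (by omega)]

-- an admitted input's required sizes are all nonnegative
theorem cost_nonneg (x v : Int) (h0 : v ≠ 0) (hp : 0 < v → -v < x) (hn : v < 0 → x < -v) :
    0 ≤ pyCeilDiv x v := by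
  unfold pyCeilDiv
  rcases lt_or_gt_of_ne h0 with hv | hv
  · have hb := PySem.Int.mod_neg_bounds (a := -x) hv
    have he := PySem.Int.floordiv_mul_add_mod (-x) v
    have hx := hn hv
    by_contra hc
    push Not at hc
    have h1 : 1 ≤ PySem.Int.floordiv (-x) v := by omega
    nlinarith [he, hb.1, hb.2]
  · have h1 := PySem.Int.le_floordiv_iff_mul_le (a := -x) (b := v) (q := 1) hv
    have : ¬ (1 ≤ PySem.Int.floordiv (-x) v) := fun h => by
      have := h1.mp h
      have := hp hv
      linarith
    omega

-- B's fold over the values equals gRec over the cost list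
theorem foldB_eq_gRec (x : Int) (b : List Int) :
    (b.foldl (fun (s : Int × Int) v =>
      let cnt := s.1 + 1
      if pyCeilDiv x v ≤ cnt then (0, s.2 + 1) else (cnt, s.2)) ((0 : Int), (0 : Int))) =
    gRec (b.map (fun v => pyCeilDiv x v)) b.length := by
  induction b using List.reverseRecOn with
  | nil => simp [gRec]
  | append_singleton ys v ih =>
    rw [List.foldl_append, List.foldl_cons, List.foldl_nil, ih]
    rw [List.map_append, List.length_append]
    simp only [List.map_cons, List.map_nil, List.length_cons, List.length_nil]
    rw [gRec, gRec_append _ _ ys.length (by simp)]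
    have hget : (ys.map (fun v => pyCeilDiv x v) ++ [pyCeilDiv x v]).getD ys.length 0
        = pyCeilDiv x v := by
      rw [List.getD_eq_getElem _ 0 (by simp)]
      simp
    rw [hget]

-- one step of A's loop, at i = k+1, preserves the dp-table characterisation
theorem stepA_next (cs : List Int) (k : Nat) (hk : k < cs.length)
    (dpk : List Int) (hlen : dpk.length = cs.length + 1)
    (hval : ∀ j : Nat, j ≤ cs.length →
      PySem.List.pyGetD dpk (j : Int) 0 = if j ≤ k then dpRec cs j else 0) :
    (solveStep cs dpk ((k : Int) + 1)).length = cs.length + 1 ∧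
    (∀ j : Nat, j ≤ cs.length →
      PySem.List.pyGetD (solveStep cs dpk ((k : Int) + 1)) (j : Int) 0 =
        if j ≤ k + 1 then dpRec cs j else 0) := by
  have hi : ((k : Int) + 1) = ((k + 1 : Nat) : Int) := by push_cast; ring
  unfold solveStep
  rw [hi]
  have hi1 : ((k + 1 : Nat) : Int) - 1 = ((k : Nat) : Int) := by push_cast; ring
  rw [hi1]
  have hcost : PySem.List.pyGetD cs ((k : Nat) : Int) 0 = cs.getD k 0 :=
    PySem.List.pyGetD_natCast cs k 0
  rw [hcost]
  set c := cs.getD k 0 with hc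
  have hget_i : PySem.List.pyGetD dpk ((k + 1 : Nat) : Int) 0 = 0 := by
    rw [hval (k + 1) (by omega)]
    simp
  have hget_prev : PySem.List.pyGetD dpk ((k : Nat) : Int) 0 = dpRec cs k := by
    rw [hval k (by omega)]
    simp
  rw [hget_i, hget_prev, max_eq_right (dpRec_nonneg cs k)]
  have hk1len : k + 1 < dpk.length := by omega
  have hdp1get : ∀ j : Nat, j ≤ cs.length →
      PySem.List.pyGetD (PySem.List.pySetD dpk ((k + 1 : Nat) : Int) (dpRec cs k)) (j : Int) 0 =
        if j = k + 1 then dpRec cs k else if j ≤ k then dpRec cs j else 0 := by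
    intro j hj
    rw [PySem.List.pyGetD_pySetD_natCast dpk (k + 1) j (dpRec cs k) 0 hk1len]
    split
    · rfl
    · exact hval j hj
  have hdp1len : (PySem.List.pySetD dpk ((k + 1 : Nat) : Int) (dpRec cs k)).length = cs.length + 1 := by
    rw [PySem.List.length_pySetD, hlen]
  have hgi : PySem.List.pyGetD (PySem.List.pySetD dpk ((k + 1 : Nat) : Int) (dpRec cs k)) ((k + 1 : Nat) : Int) 0 = dpRec cs k := by
    rw [hdp1get (k + 1) (by omega)]
    simp
  -- the common wrap-up: after the guarded second write of value dpRec cs (k+1)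
  have wrap : ∀ w : Int, w = dpRec cs (k + 1) →
      (PySem.List.pySetD (PySem.List.pySetD dpk ((k + 1 : Nat) : Int) (dpRec cs k)) ((k + 1 : Nat) : Int) w).length = cs.length + 1 ∧
      (∀ j : Nat, j ≤ cs.length →
        PySem.List.pyGetD (PySem.List.pySetD (PySem.List.pySetD dpk ((k + 1 : Nat) : Int) (dpRec cs k)) ((k + 1 : Nat) : Int) w) (j : Int) 0 =
          if j ≤ k + 1 then dpRec cs j else 0) := by
    intro w hw
    constructor
    · rw [PySem.List.length_pySetD, hdp1len]
    · intro j hj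
      rw [PySem.List.pyGetD_pySetD_natCast _ (k + 1) j _ 0 (by rw [hdp1len]; omega)]
      split
      · rename_i hje
        rw [if_pos (by omega), hje, hw]
      · rename_i hje
        rw [hdp1get j hj, if_neg hje]
        by_cases hjk : j ≤ k
        · rw [if_pos hjk, if_pos (by omega)]
        · rw [if_neg hjk, if_neg (by omega)]
  by_cases hneg : c < 0
  · -- negative cost: the guard passes and the read cell is an untouched 0
    rw [if_pos (by omega)]
    have hread0 : PySem.List.pyGetD (PySem.List.pySetD dpk ((k + 1 : Nat) : Int) (dpRec cs k)) (((k + 1 : Nat) : Int) - c) 0 = 0 := by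
      have hpos : 0 ≤ ((k + 1 : Nat) : Int) - c := by omega
      by_cases hbig : ((k + 1 : Nat) : Int) - c < ((cs.length + 1 : Nat) : Int)
      · have hjn : (((k + 1 : Nat) : Int) - c) = (((((k + 1 : Nat) : Int) - c).toNat : Nat) : Int) := by omega
        rw [hjn, hdp1get _ (by omega), if_neg (by omega), if_neg (by omega)]
      · rw [PySem.List.pyGetD_of_nonneg _ 0 hpos, List.getD_eq_default]
        rw [hdp1len]
        omega
    rw [hread0, hgi]
    have hd : max (dpRec cs k) (0 + 1) = dpRec cs (k + 1) := by
      rw [dpRec]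
      simp only [← hc]
      rw [if_pos hneg]
      omega
    rw [hd]
    exact wrap _ rfl
  · by_cases hzero : c = 0
    · -- zero cost: the guarded read is the cell just written
      rw [if_pos (by omega)]
      have hsub : (((k + 1 : Nat) : Int) - c) = ((k + 1 : Nat) : Int) := by omega
      rw [hsub, hgi]
      have hd : max (dpRec cs k) (dpRec cs k + 1) = dpRec cs (k + 1) := by
        rw [dpRec]
        simp only [← hc]
        rw [if_neg hneg, if_pos hzero]
        omega
      rw [hd]
      exact wrap _ rfl
    · have hc1 : 1 ≤ c := by omega
      by_cases hg : (0 : Int) ≤ ((k + 1 : Nat) : Int) - c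
      · -- guard true: 1 ≤ c ≤ k+1
        rw [if_pos hg]
        have hcle : c ≤ (k : Int) + 1 := by push_cast at hg ⊢; omega
        have hd1 : dpRec cs (k + 1) = max (dpRec cs k) (dpRec cs (k + 1 - c.toNat) + 1) := by
          rw [dpRec]
          simp only [← hc]
          rw [if_neg hneg, if_neg hzero, if_pos hcle]
        have hidx : ((k + 1 : Nat) : Int) - c = ((k + 1 - c.toNat : Nat) : Int) := by
          push_cast at hg ⊢
          omega
        rw [hidx]
        have hgm : PySem.List.pyGetD (PySem.List.pySetD dpk ((k + 1 : Nat) : Int) (dpRec cs k)) ((k + 1 - c.toNat : Nat) : Int) 0 = dpRec cs (k + 1 - c.toNat) := by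
          rw [hdp1get (k + 1 - c.toNat) (by omega), if_neg (by omega), if_pos (by omega : k + 1 - c.toNat ≤ k)]
        rw [hgi, hgm, ← hd1]
        exact wrap _ rfl
      · -- guard false: c > k+1, dp[k+1] stays dpRec cs k = dpRec cs (k+1)
        rw [if_neg hg]
        have hd1 : dpRec cs (k + 1) = dpRec cs k := by
          rw [dpRec]
          simp only [← hc]
          rw [if_neg hneg, if_neg hzero, if_neg (by push_cast at hg ⊢; omega)]
        refine ⟨hdp1len, ?_⟩
        intro j hj
        rw [hdp1get j hj]
        by_cases hje : j = k + 1
        · rw [if_pos hje, hje, if_pos (le_refl _), hd1]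
        · rw [if_neg hje]
          by_cases hjk : j ≤ k
          · rw [if_pos hjk, if_pos (by omega)]
          · rw [if_neg hjk, if_neg (by omega)]

-- A's dp-array fold computes dpRec on every filled prefix cell
theorem foldA_inv (cs : List Int) :
    ∀ k, k ≤ cs.length →
      ((PySem.List.pyRange 1 ((k : Int) + 1) 1).foldl (solveStep cs)
          (List.replicate (cs.length + 1) 0)).length = cs.length + 1 ∧
      (∀ j : Nat, j ≤ cs.length →
        PySem.List.pyGetD
          ((PySem.List.pyRange 1 ((k : Int) + 1) 1).foldl (solveStep cs)
            (List.replicate (cs.length + 1) 0)) (j : Int) 0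
        = if j ≤ k then dpRec cs j else 0) := by
  intro k
  induction k with
  | zero =>
    intro _
    rw [PySem.List.pyRange_one_eq_nil (by norm_num)]
    constructor
    · simp
    · intro j hj
      rw [List.foldl_nil, PySem.List.pyGetD_natCast]
      have hrep : (List.replicate (cs.length + 1) (0 : Int)).getD j 0 = 0 := by
        simp [List.getD]
      rw [hrep]
      by_cases h0 : j ≤ 0
      · have : j = 0 := by omega
        rw [if_pos h0, this, dpRec]
      · rw [if_neg h0]
  | succ k ih =>
    intro hk
    obtain ⟨ihlen, ihval⟩ := ih (by omega)
    have hrange : PySem.List.pyRange 1 (((k + 1 : Nat) : Int) + 1) 1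
        = PySem.List.pyRange 1 ((k : Int) + 1) 1 ++ [(k : Int) + 1] := by
      have h1 : (((k + 1 : Nat) : Int) + 1) = (((k : Int) + 1) + 1) := by push_cast; ring
      rw [h1]
      exact PySem.List.pyRange_one_succ_right (by omega)
    rw [hrange, List.foldl_append, List.foldl_cons, List.foldl_nil]
    exact stepA_next cs k (by omega) _ ihlen ihval

-- ===== VERDICT (by name: the statement is the Claim_ definition above) =====
theorem solve_spec : Claim_equal_solve := by
  unfold Claim_equal_solve
  intro arr x _ hpre
  unfold Spec_solve solve solve_alt
  simp only []
  set b := PySem.List.sorted arr id true with hbd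
  have hbmem : ∀ v ∈ b, v ≠ 0 ∧ (0 < v → -v < x) ∧ (v < 0 → x < -v) := by
    intro v hv
    exact hpre v ((PySem.List.mem_sorted arr id true v).mp hv)
  set cs := b.map (fun v => pyCeilDiv x v) with hcsd
  have hlen : cs.length = b.length := by rw [hcsd, List.length_map]
  have hnn : ∀ j : Nat, 0 ≤ cs.getD j 0 := by
    intro j
    by_cases hj : j < cs.length
    · rw [List.getD_eq_getElem cs 0 hj]
      have hmem : cs[j] ∈ cs := List.getElem_mem _
      obtain ⟨v, hvmem, hveq⟩ := List.mem_map.mp hmem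
      obtain ⟨h0, hp, hn⟩ := hbmem v hvmem
      rw [← hveq]
      exact cost_nonneg x v h0 hp hn
    · rw [List.getD_eq_default cs 0 (by omega)]
  obtain ⟨_, hval⟩ := foldA_inv cs cs.length (le_refl _)
  have hread := hval cs.length (le_refl _)
  rw [if_pos (le_refl _), dpRec_eq_gRec cs hnn] at hread
  rw [hlen] at hread
  rw [hread, foldB_eq_gRec x b, ← hcsd]
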